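-- pv_equiv track=rewrite | github.com/Patxi91/CodeWars_Cloud | 6kyu-Last Survivors Ep2-Patxi.py | last_survivors
-- ===== SOURCE A (Python) =====
-- from string import ascii_lowercase
--
-- def next_alpha(s):
--     return chr((ord(s.upper())+1 - 65) % 26 + 65).lower()
--
-- def last_survivors(string):
--     while len(set(string)) != len(string):
--         for letter in ascii_lowercase:
--             instances = string.count(letter)
--             string = string.replace(letter, "")
--             for i in range(0, instances//2):
--                 string += next_alpha(letter)
--             for i in range(0, instances%2):
--                 string += letter
--     sorted_s = ''.join(sorted(string))
--     return sorted_s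
-- ===== SOURCE B (Python) =====
-- # Closed form: pairing letters is binary addition with end-around carry, so the
-- # survivors are the bits of (N-1) % (2**26 - 1) + 1 where N encodes the letter
-- # multiset as an integer; no simulation loop at all.
-- def last_survivors(string):
--     M = (1 << 26) - 1
--     n = 0
--     others = []
--     for ch in string:
--         if 'a' <= ch <= 'z':
--             n += 1 << (ord(ch) - 97)
--         else:
--             others.append(ch)
--     if n != 0:
--         n = (n - 1) % M + 1
--     survivors = [chr(97 + i) for i in range(26) if n // (1 << i) % 2 == 1]
--     return ''.join(sorted(others + survivors))
-- ===== Notes on version B (the rewrite author's own statement) =====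
-- stated objective: faster
-- what changed: B replaces A's round-by-round pair-merging simulation by a number-theoretic closed form: encode the letter multiset as N = sum count(letter)*2^index, reduce once to ((N-1) mod (2^26-1)) + 1 (pair-merging is binary addition with end-around carry), and read the surviving letters off the bits; non-letters pass through to the final sort.
import Mathlib
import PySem

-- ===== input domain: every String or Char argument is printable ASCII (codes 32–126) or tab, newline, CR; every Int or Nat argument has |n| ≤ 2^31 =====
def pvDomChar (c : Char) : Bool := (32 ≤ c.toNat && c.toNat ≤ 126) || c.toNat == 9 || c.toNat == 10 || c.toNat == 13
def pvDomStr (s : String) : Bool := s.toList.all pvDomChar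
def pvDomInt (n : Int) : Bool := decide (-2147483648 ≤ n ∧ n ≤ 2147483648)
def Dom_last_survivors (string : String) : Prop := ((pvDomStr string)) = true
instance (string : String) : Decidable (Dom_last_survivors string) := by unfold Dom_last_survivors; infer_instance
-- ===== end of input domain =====

set_option maxHeartbeats 1000000


-- B replaces A's round-by-round pair-merging simulation by a closed form: pair-merging is binary
-- addition with end-around carry, so the survivors are the bits of ((N-1) mod (2^26-1)) + 1 where
-- N encodes the letter multiset; same return value on Pre_.

-- ===== PORT A =====
-- string.ascii_lowercase
def asciiLowercase : List Char :=
  ['a','b','c','d','e','f','g','h','i','j','k','l','m','n','o','p','q','r','s','t','u','v','w','x','y','z']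

-- next_alpha(s) = chr((ord(s.upper())+1 - 65) % 26 + 65).lower()
def nextAlpha (c : Char) : Char :=
  PySem.Chars.lowerChar
    (Char.ofNat (PySem.Int.mod (((PySem.Chars.upperChar c).toNat : Int) + 1 - 65) 26 + 65).toNat)

-- the body of A's `for letter in ascii_lowercase` loop, on the string's character list
def stepA (s : List Char) (letter : Char) : List Char :=
  let instances : Int := (PySem.Chars.count s [letter] : Int)
  let s1 := PySem.Chars.replace s [letter] []
  let s2 := (PySem.List.pyRange 0 (PySem.Int.floordiv instances 2) 1).foldl
              (fun t _ => t ++ [nextAlpha letter]) s1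
  (PySem.List.pyRange 0 (PySem.Int.mod instances 2) 1).foldl (fun t _ => t ++ [letter]) s2

-- A's while loop; the fuel argument is only a totality guard (under Pre_ the loop exits before
-- the fuel runs out: each executed round removes at least one letter, see the sumS lemmas)
def loopA : Nat → List Char → List Char
  | 0, s => s
  | fuel + 1, s =>
    if PySem.Set.len (PySem.Set.ofList s) ≠ (s.length : Int) then
      loopA fuel (asciiLowercase.foldl stepA s)
    else s

def last_survivors (string : String) : String :=
  let s := string.toList
  let s := loopA (s.length + 1) s
  String.ofList (PySem.List.sorted s (fun x => x) false)   -- ''.join(sorted(string))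

-- ===== PORT B =====
def last_survivors_alt (string : String) : String :=
  let s := string.toList
  -- one pass: n += 1 << (ord(ch)-97) for lowercase ch (exact: 97 ≤ ch.toNat in that branch),
  -- others collected in order
  let st := s.foldl
    (fun (st : Int × List Char) ch =>
      if 'a' ≤ ch ∧ ch ≤ 'z' then
        (st.1 + ((2 ^ (ch.toNat - 97) : Nat) : Int), st.2)
      else (st.1, st.2 ++ [ch]))
    ((0 : Int), [])
  -- if n != 0: n = (n - 1) % M + 1   with M = (1 << 26) - 1
  let n := if st.1 ≠ 0 then PySem.Int.mod (st.1 - 1) 67108863 + 1 else st.1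
  -- [chr(97 + i) for i in range(26) if n // (1 << i) % 2 == 1]  (exact: 0 ≤ i here, so i.toNat = i)
  let survivors := ((PySem.List.pyRange 0 26).filter
      (fun i => PySem.Int.mod (PySem.Int.floordiv n ((2:Int) ^ i.toNat)) 2 == 1)).map
      (fun i => Char.ofNat (97 + i).toNat)
  String.ofList (PySem.List.sorted (st.2 ++ survivors) (fun x => x) false)

-- ===== PRECONDITION & SPEC =====
-- A loops forever as soon as some non-lowercase character occurs twice (the duplicate can never be
-- removed, so `len(set(string)) != len(string)` stays true); Pre_ is exactly A's halting domain.
def Pre_last_survivors (string : String) : Prop :=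
  (string.toList.filter (fun ch => decide ¬('a' ≤ ch ∧ ch ≤ 'z'))).Nodup
instance (string : String) : Decidable (Pre_last_survivors string) := by
  unfold Pre_last_survivors; infer_instance

def pvWitness_last_survivors : String := "zza bcc!"

def Spec_last_survivors (string : String) (out : String) : Prop := out = last_survivors_alt string
instance (string : String) (out : String) : Decidable (Spec_last_survivors string out) := by
  unfold Spec_last_survivors; infer_instance

-- ===== CLAIM (what is proved, stated in full; the proofs are below) =====
def Claim_equal_last_survivors : Prop := ∀ (string : String), Dom_last_survivors string → Pre_last_survivors string → Spec_last_survivors string (last_survivors string)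

-- ===== LEMMAS AND PROOFS =====

-- chr(97+i)
def letterC (i : Nat) : Char := Char.ofNat (97 + i)
-- 'a' <= ch <= 'z'
def lowB (ch : Char) : Bool := decide ('a' ≤ ch ∧ ch ≤ 'z')
-- the non-lowercase characters, in order
def othersOf (s : List Char) : List Char := s.filter (fun ch => !lowB ch)
-- the letter multiset encoded as a number: Σ count(letter i) * 2^i
def valS (s : List Char) : Nat := ∑ i ∈ Finset.range 26, s.count (letterC i) * 2 ^ i
-- the total number of lowercase letters (the termination measure)
def sumS (s : List Char) : Nat := ∑ i ∈ Finset.range 26, s.count (letterC i)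

-- ---- PySem.Chars.count / replace on a single-character pattern ----

theorem countgo_singleton (c : Char) (s : List Char) (fuel acc : Nat) (h : s.length ≤ fuel) :
    PySem.Chars.count.go [c] fuel s acc = acc + s.count c := by
  induction s generalizing fuel acc with
  | nil => cases fuel <;> simp [PySem.Chars.count.go]
  | cons hd t ih =>
    cases fuel with
    | zero => simp at h
    | succ f =>
      simp only [PySem.Chars.count.go, List.isPrefixOf, List.count_cons]
      by_cases hc : c = hd
      · subst hc; simp [ih _ _ (by simpa using Nat.le_of_succ_le_succ h)]
        ring
      · simp [hc, Ne.symm hc, ih _ _ (by simpa using Nat.le_of_succ_le_succ h)]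

theorem replacego_singleton (c : Char) (s acc : List Char) (fuel : Nat) (h : s.length ≤ fuel) :
    PySem.Chars.replace.go [c] [] fuel s acc = acc.reverse ++ s.filter (fun x => decide (x ≠ c)) := by
  induction s generalizing fuel acc with
  | nil => cases fuel <;> simp [PySem.Chars.replace.go]
  | cons hd t ih =>
    cases fuel with
    | zero => simp at h
    | succ f =>
      simp only [PySem.Chars.replace.go, List.isPrefixOf]
      by_cases hc : c = hd
      · subst hc; simp [ih _ _ (by simpa using Nat.le_of_succ_le_succ h)]
      · simp [hc, Ne.symm hc, ih _ _ (by simpa using Nat.le_of_succ_le_succ h)]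

theorem count_singleton (c : Char) (s : List Char) :
    PySem.Chars.count s [c] = s.count c := by
  simp [PySem.Chars.count, countgo_singleton c s s.length 0 le_rfl]

theorem replace_singleton (c : Char) (s : List Char) :
    PySem.Chars.replace s [c] [] = s.filter (fun x => decide (x ≠ c)) := by
  simp [PySem.Chars.replace, replacego_singleton c s [] s.length le_rfl]

theorem foldl_append_const {α β : Type} (l : List β) (a : α) (s : List α) :
    l.foldl (fun t _ => t ++ [a]) s = s ++ List.replicate l.length a := by
  induction l generalizing s with
  | nil => simp
  | cons h t ih => simp [ih, List.replicate_succ]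

theorem stepA_closed (s : List Char) (ℓ : Char) :
    stepA s ℓ = s.filter (fun x => decide (x ≠ ℓ))
      ++ List.replicate (s.count ℓ / 2) (nextAlpha ℓ)
      ++ List.replicate (s.count ℓ % 2) ℓ := by
  simp only [stepA, count_singleton, replace_singleton, foldl_append_const]
  rw [show ((s.count ℓ : Int)) = ((s.count ℓ : Nat) : Int) from rfl, show (2:Int) = ((2:Nat):Int) from rfl,
      PySem.Int.floordiv_natCast, PySem.Int.mod_natCast,
      PySem.List.pyRange_zero_natCast, PySem.List.pyRange_zero_natCast]
  simp [List.append_assoc]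

-- ---- finite facts about the 26 letters ----
theorem ascii_eq_map : asciiLowercase = (List.range 26).map letterC := by decide
theorem nextAlpha_letterC : ∀ i : Fin 26, nextAlpha (letterC i) = letterC ((i + 1) % 26) := by decide
theorem lowB_letterC : ∀ i : Fin 26, lowB (letterC i) = true := by decide
theorem letterC_inj : ∀ i j : Fin 26, letterC i = letterC j ↔ i = j := by decide

theorem low_char_eq (ch : Char) (h : lowB ch = true) :
    ch.toNat - 97 < 26 ∧ ch = letterC (ch.toNat - 97) := by
  simp only [lowB, decide_eq_true_eq] at h
  obtain ⟨h1, h2⟩ := h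
  have ha : 97 ≤ ch.toNat := h1
  have hz : ch.toNat ≤ 122 := h2
  refine ⟨by omega, ?_⟩
  have e : 97 + (ch.toNat - 97) = ch.toNat := by omega
  simp only [letterC, e]
  exact (Char.ofNat_toNat ch).symm

theorem letterC_inj' {i j : Nat} (hi : i < 26) (hj : j < 26) : letterC i = letterC j ↔ i = j := by
  have := letterC_inj ⟨i, hi⟩ ⟨j, hj⟩
  simpa [Fin.ext_iff] using this

theorem count_stepA (s : List Char) (i j : Nat) (hi : i < 26) (hj : j < 26) :
    (stepA s (letterC i)).count (letterC j) =
      if j = i then s.count (letterC i) % 2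
      else if j = (i + 1) % 26 then s.count (letterC j) + s.count (letterC i) / 2
      else s.count (letterC j) := by
  have hn := nextAlpha_letterC ⟨i, hi⟩
  simp only [] at hn
  have hmod : (i + 1) % 26 < 26 := Nat.mod_lt _ (by omega)
  have hne : i ≠ (i + 1) % 26 := by omega
  rw [stepA_closed, hn]
  simp only [List.count_append]
  by_cases h1 : j = i
  · subst h1
    have e1 : (s.filter (fun x => decide (x ≠ letterC j))).count (letterC j) = 0 :=
      List.count_eq_zero.mpr (by simp)
    have e2 : (List.replicate (s.count (letterC j) / 2) (letterC ((j + 1) % 26))).count (letterC j) = 0 := by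
      rw [List.count_replicate, if_neg]
      simp only [beq_iff_eq, letterC_inj' hmod hj]; omega
    have e3 : (List.replicate (s.count (letterC j) % 2) (letterC j)).count (letterC j)
        = s.count (letterC j) % 2 := by
      rw [List.count_replicate, if_pos (by simp)]
    rw [e1, e2, e3, if_pos rfl]; omega
  · by_cases h2 : j = (i + 1) % 26
    · have e1 : (s.filter (fun x => decide (x ≠ letterC i))).count (letterC j) = s.count (letterC j) :=
        List.count_filter (by simp only [decide_eq_true_eq, ne_eq, letterC_inj' hj hi]; simpa using h1)
      have e2 : (List.replicate (s.count (letterC i) / 2) (letterC ((i + 1) % 26))).count (letterC j)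
          = s.count (letterC i) / 2 := by
        rw [List.count_replicate, if_pos (by simp [h2])]
      have e3 : (List.replicate (s.count (letterC i) % 2) (letterC i)).count (letterC j) = 0 := by
        rw [List.count_replicate, if_neg]; simp only [beq_iff_eq, letterC_inj' hi hj]; omega
      rw [e1, e2, e3, if_neg h1, if_pos h2]; omega
    · have e1 : (s.filter (fun x => decide (x ≠ letterC i))).count (letterC j) = s.count (letterC j) :=
        List.count_filter (by simp only [decide_eq_true_eq, ne_eq, letterC_inj' hj hi]; simpa using h1)
      have e2 : (List.replicate (s.count (letterC i) / 2) (letterC ((i + 1) % 26))).count (letterC j) = 0 := by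
        rw [List.count_replicate, if_neg]; simp only [beq_iff_eq, letterC_inj' hmod hj]; omega
      have e3 : (List.replicate (s.count (letterC i) % 2) (letterC i)).count (letterC j) = 0 := by
        rw [List.count_replicate, if_neg]; simp only [beq_iff_eq, letterC_inj' hi hj]; omega
      rw [e1, e2, e3, if_neg h1, if_neg h2]; omega

theorem othersOf_stepA (s : List Char) (i : Nat) (hi : i < 26) :
    othersOf (stepA s (letterC i)) = othersOf s := by
  have hmod : (i + 1) % 26 < 26 := Nat.mod_lt _ (by omega)
  have hlow := lowB_letterC ⟨i, hi⟩
  have hlow2 := lowB_letterC ⟨(i + 1) % 26, hmod⟩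
  have hn := nextAlpha_letterC ⟨i, hi⟩
  simp only [] at hlow hlow2 hn
  rw [othersOf, stepA_closed, hn, List.filter_append, List.filter_append,
      List.filter_replicate, List.filter_replicate, List.filter_filter]
  rw [if_neg (by simp [hlow2]), if_neg (by simp [hlow])]
  rw [othersOf]
  have hpt : ∀ x : Char, (!lowB x && decide (x ≠ letterC i)) = !lowB x := by
    intro x
    by_cases hx : x = letterC i
    · subst hx; simp [hlow]
    · simp [hx]
  simp only [hpt, List.append_nil]

-- ---- decomposing the 26-slot sums around slots i and (i+1) % 26 ----
theorem sum26_decompose (g : Nat → Nat) (i : Nat) (hi : i < 26) :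
    ∑ j ∈ Finset.range 26, g j =
      (∑ j ∈ (Finset.range 26 \ {i}) \ {(i + 1) % 26}, g j) + g ((i + 1) % 26) + g i := by
  have hmod : (i + 1) % 26 < 26 := Nat.mod_lt _ (by omega)
  have hne : i ≠ (i + 1) % 26 := by omega
  have himem : i ∈ Finset.range 26 := Finset.mem_range.mpr hi
  have hmmem : (i + 1) % 26 ∈ Finset.range 26 \ {i} := by
    simp [Finset.mem_sdiff, Finset.mem_range.mpr hmod, Ne.symm hne]
  rw [Finset.sum_eq_sum_diff_singleton_add himem g,
      Finset.sum_eq_sum_diff_singleton_add hmmem g]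

theorem rest_stepA (s : List Char) (i : Nat) (hi : i < 26) (g : Nat → Nat → Nat) :
    ∑ j ∈ (Finset.range 26 \ {i}) \ {(i + 1) % 26}, g j ((stepA s (letterC i)).count (letterC j))
      = ∑ j ∈ (Finset.range 26 \ {i}) \ {(i + 1) % 26}, g j (s.count (letterC j)) := by
  refine Finset.sum_congr rfl (fun j hj => ?_)
  simp only [Finset.mem_sdiff, Finset.mem_range, Finset.mem_singleton] at hj
  rw [count_stepA s i j hi hj.1.1, if_neg hj.1.2, if_neg hj.2]

theorem sumS_stepA_eq (s : List Char) (i : Nat) (hi : i < 26) :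
    sumS (stepA s (letterC i)) + s.count (letterC i) =
      sumS s + s.count (letterC i) / 2 + s.count (letterC i) % 2 := by
  have hmod : (i + 1) % 26 < 26 := Nat.mod_lt _ (by omega)
  have hne : i ≠ (i + 1) % 26 := by omega
  rw [sumS, sumS, sum26_decompose _ i hi, sum26_decompose _ i hi,
      rest_stepA s i hi (fun _ c => c),
      count_stepA s i ((i+1)%26) hi hmod, if_neg (Ne.symm hne), if_pos rfl,
      count_stepA s i i hi hi, if_pos rfl]
  omega

theorem valS_stepA_eq (s : List Char) (i : Nat) (hi : i < 26) :
    valS (stepA s (letterC i)) + 2 ^ (i + 1) * (s.count (letterC i) / 2) =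
      valS s + 2 ^ ((i + 1) % 26) * (s.count (letterC i) / 2) := by
  have hmod : (i + 1) % 26 < 26 := Nat.mod_lt _ (by omega)
  have hne : i ≠ (i + 1) % 26 := by omega
  rw [valS, valS, sum26_decompose _ i hi, sum26_decompose _ i hi,
      rest_stepA s i hi (fun j c => c * 2 ^ j),
      count_stepA s i ((i+1)%26) hi hmod, if_neg (Ne.symm hne), if_pos rfl,
      count_stepA s i i hi hi, if_pos rfl]
  obtain ⟨q, r, hq, hr, hc⟩ : ∃ q r, s.count (letterC i) / 2 = q ∧ s.count (letterC i) % 2 = r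
      ∧ s.count (letterC i) = 2 * q + r := ⟨_, _, rfl, rfl, by omega⟩
  rw [hq, hr, hc, pow_succ]
  ring

theorem valS_stepA_mod (s : List Char) (i : Nat) (hi : i < 26) :
    ∃ k, valS s = valS (stepA s (letterC i)) + k * 67108863 := by
  have he := valS_stepA_eq s i hi
  by_cases h25 : i = 25
  · subst h25
    refine ⟨s.count (letterC 25) / 2, ?_⟩
    norm_num at he
    omega
  · rw [Nat.mod_eq_of_lt (by omega : i + 1 < 26)] at he
    exact ⟨0, by omega⟩

theorem count_le_sumS (s : List Char) (i : Nat) (hi : i < 26) :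
    s.count (letterC i) ≤ sumS s := by
  rw [sumS]
  exact Finset.single_le_sum (f := fun j => s.count (letterC j))
    (fun _ _ => Nat.zero_le _) (Finset.mem_range.mpr hi)

theorem sumS_stepA_le (s : List Char) (i : Nat) (hi : i < 26) :
    sumS (stepA s (letterC i)) ≤ sumS s := by
  have := sumS_stepA_eq s i hi; omega

theorem sumS_stepA_lt (s : List Char) (i : Nat) (hi : i < 26) (h2 : 2 ≤ s.count (letterC i)) :
    sumS (stepA s (letterC i)) < sumS s := by
  have := sumS_stepA_eq s i hi; omega

theorem sumS_stepA_pos (s : List Char) (i : Nat) (hi : i < 26) (h1 : 1 ≤ sumS s) :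
    1 ≤ sumS (stepA s (letterC i)) := by
  have he := sumS_stepA_eq s i hi
  have hle := count_le_sumS s i hi
  omega

-- ---- the fold over all 26 letters ----
theorem fold_inv (is : List Nat) (h : ∀ i ∈ is, i < 26) (s : List Char) :
    othersOf ((is.map letterC).foldl stepA s) = othersOf s
    ∧ (∃ k, valS s = valS ((is.map letterC).foldl stepA s) + k * 67108863)
    ∧ sumS ((is.map letterC).foldl stepA s) ≤ sumS s
    ∧ (1 ≤ sumS s → 1 ≤ sumS ((is.map letterC).foldl stepA s)) := by
  induction is generalizing s with
  | nil => exact ⟨rfl, ⟨0, by simp⟩, le_rfl, fun h => h⟩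
  | cons i t ih =>
    have hi : i < 26 := h i (by simp)
    have ht : ∀ j ∈ t, j < 26 := fun j hj => h j (by simp [hj])
    simp only [List.map_cons, List.foldl_cons]
    obtain ⟨o1, ⟨k1, v1⟩, l1, p1⟩ := ih ht (stepA s (letterC i))
    obtain ⟨k0, v0⟩ := valS_stepA_mod s i hi
    exact ⟨by rw [o1, othersOf_stepA s i hi],
      ⟨k0 + k1, by rw [v0, v1]; ring⟩,
      le_trans l1 (sumS_stepA_le s i hi),
      fun hp => p1 (sumS_stepA_pos s i hi hp)⟩

theorem sumS_fold_lt (is : List Nat) (h : ∀ i ∈ is, i < 26) (s : List Char)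
    (hf : ∃ i ∈ is, 2 ≤ s.count (letterC i)) :
    sumS ((is.map letterC).foldl stepA s) < sumS s := by
  induction is generalizing s with
  | nil => simp at hf
  | cons i t ih =>
    have hi : i < 26 := h i (by simp)
    have ht : ∀ j ∈ t, j < 26 := fun j hj => h j (by simp [hj])
    simp only [List.map_cons, List.foldl_cons]
    by_cases h2 : 2 ≤ s.count (letterC i)
    · exact lt_of_le_of_lt (fold_inv t ht (stepA s (letterC i))).2.2.1 (sumS_stepA_lt s i hi h2)
    · rcases hf with ⟨j, hj, hcj⟩
      rcases List.mem_cons.mp hj with rfl | hjt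
      · omega
      · have hjlt : j < 26 := ht j hjt
        have hkeep : 2 ≤ (stepA s (letterC i)).count (letterC j) := by
          rcases eq_or_ne j i with rfl | hne2
          · omega
          · rw [count_stepA s i j hi hjlt, if_neg hne2]; split_ifs <;> omega
        exact lt_of_lt_of_le (ih ht (stepA s (letterC i)) ⟨j, hjt, hkeep⟩)
          (sumS_stepA_le s i hi)

-- ---- the loop condition under Pre_ ----
theorem setlen_iff (s : List Char) : (PySem.Set.ofList s).length = s.length ↔ s.Nodup := by
  constructor
  · intro h
    have h1 : (PySem.Set.ofList s).toFinset = s.toFinset := by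
      ext x; simp [List.mem_toFinset, PySem.Set.mem_ofList]
    have h2 : (PySem.Set.ofList s).toFinset.card = (PySem.Set.ofList s).length :=
      List.toFinset_card_of_nodup (PySem.Set.nodup_ofList s)
    have h3 : s.toFinset.card = s.dedup.length := List.card_toFinset s
    rw [h1] at h2
    have h4 : s.dedup.length = s.length := by omega
    have h5 : s.dedup = s := (List.dedup_sublist s).eq_of_length h4
    rw [← h5]; exact s.nodup_dedup
  · intro h; rw [PySem.Set.ofList_eq_self_of_nodup s h]

theorem cond_iff (s : List Char) (hO : (othersOf s).Nodup) :
    (PySem.Set.len (PySem.Set.ofList s) ≠ (s.length : Int)) ↔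
      ∃ i : Fin 26, 2 ≤ s.count (letterC i) := by
  rw [PySem.Set.len_eq]
  rw [show ((List.length (PySem.Set.ofList s) : Int) ≠ (s.length : Int)) ↔
        ((PySem.Set.ofList s).length ≠ s.length) by exact_mod_cast Iff.rfl]
  rw [Ne, setlen_iff]
  constructor
  · intro h
    rw [List.nodup_iff_count_le_one] at h
    push Not at h
    obtain ⟨ch, hch⟩ := h
    by_cases hl : lowB ch = true
    · obtain ⟨hlt, he⟩ := low_char_eq ch hl
      exact ⟨⟨ch.toNat - 97, hlt⟩, by rw [← he]; omega⟩
    · exfalso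
      have : (othersOf s).count ch = s.count ch := by
        rw [othersOf]
        exact List.count_filter (by simp [hl])
      have h1 : (othersOf s).count ch ≤ 1 := List.nodup_iff_count_le_one.mp hO ch
      omega
  · rintro ⟨i, h⟩ hnd
    have := List.nodup_iff_count_le_one.mp hnd (letterC i)
    omega

-- ---- the loop ----
theorem loop_props (fa : Nat) : ∀ (s : List Char), (othersOf s).Nodup → sumS s < fa →
    othersOf (loopA fa s) = othersOf s
    ∧ (∃ k, valS s = valS (loopA fa s) + k * 67108863)
    ∧ (∀ i : Fin 26, (loopA fa s).count (letterC i) ≤ 1)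
    ∧ (1 ≤ sumS s → 1 ≤ sumS (loopA fa s)) := by
  induction fa with
  | zero => intro s hO hfa; omega
  | succ fa' ih =>
    intro s hO hfa
    by_cases hc : ∃ i : Fin 26, 2 ≤ s.count (letterC i)
    · have hcond : PySem.Set.len (PySem.Set.ofList s) ≠ (s.length : Int) := (cond_iff s hO).mpr hc
      rw [loopA, if_pos hcond]
      set s' := asciiLowercase.foldl stepA s with hs'
      have hall : ∀ j ∈ List.range 26, j < 26 := fun j hj => List.mem_range.mp hj
      have hfi := fold_inv (List.range 26) hall s
      rw [← ascii_eq_map, ← hs'] at hfi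
      obtain ⟨o1, ⟨k1, v1⟩, l1, p1⟩ := hfi
      have hO' : (othersOf s').Nodup := by rw [o1]; exact hO
      have hlt : sumS s' < sumS s := by
        have := sumS_fold_lt (List.range 26) hall s
          (by rcases hc with ⟨i, h2⟩; exact ⟨i, List.mem_range.mpr i.isLt, h2⟩)
        rwa [← ascii_eq_map, ← hs'] at this
      obtain ⟨r1, ⟨k2, r2⟩, r3, r4⟩ := ih s' hO' (by omega)
      exact ⟨by rw [r1, o1], ⟨k1 + k2, by rw [v1, r2]; ring⟩, r3, fun hp => r4 (p1 hp)⟩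
    · have hcond : ¬ (PySem.Set.len (PySem.Set.ofList s) ≠ (s.length : Int)) :=
        fun hh => hc ((cond_iff s hO).mp hh)
      rw [loopA, if_neg hcond]
      exact ⟨rfl, ⟨0, by simp⟩, fun i => by push Not at hc; have := hc i; omega, fun h => h⟩

-- ---- bounds linking sumS, valS and the string length ----
theorem indicator_sum_le (ch : Char) :
    (∑ j ∈ Finset.range 26, if letterC j == ch then 1 else 0) ≤ 1 := by
  by_cases hl : lowB ch = true
  · obtain ⟨hlt, he⟩ := low_char_eq ch hl
    have : ∀ j ∈ Finset.range 26,
        (if letterC j == ch then 1 else 0) = if j = ch.toNat - 97 then 1 else 0 := by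
      intro j hj
      rw [Finset.mem_range] at hj
      by_cases e : j = ch.toNat - 97
      · subst e; rw [if_pos (by rw [beq_iff_eq, ← he]), if_pos rfl]
      · rw [if_neg, if_neg e]
        rw [beq_iff_eq]
        intro hc
        exact e ((letterC_inj' hj hlt).mp (hc.trans he))
    rw [Finset.sum_congr rfl this, Finset.sum_ite_eq' (Finset.range 26) (ch.toNat - 97) (fun _ => 1)]
    split_ifs <;> omega
  · have : ∀ j ∈ Finset.range 26, (if letterC j == ch then 1 else 0) = 0 := by
      intro j hj
      rw [Finset.mem_range] at hj
      rw [if_neg]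
      rw [beq_iff_eq]
      intro hc
      exact hl (hc ▸ lowB_letterC ⟨j, hj⟩)
    rw [Finset.sum_congr rfl this]; simp

theorem sumS_le_length (s : List Char) : sumS s ≤ s.length := by
  induction s with
  | nil => simp [sumS]
  | cons ch t ih =>
    rw [sumS] at *
    have : ∀ j ∈ Finset.range 26,
        (ch :: t).count (letterC j) = t.count (letterC j) + (if letterC j == ch then 1 else 0) := by
      intro j _
      rw [List.count_cons]
      congr 1
      split_ifs with h <;> simp_all
    rw [Finset.sum_congr rfl this, Finset.sum_add_distrib]
    have := indicator_sum_le ch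
    simp only [List.length_cons]
    omega

theorem sumS_le_valS (s : List Char) : sumS s ≤ valS s := by
  rw [sumS, valS]
  exact Finset.sum_le_sum (fun i _ => Nat.le_mul_of_pos_right _ (Nat.two_pow_pos i))

theorem valS_le_sumS_mul (s : List Char) : valS s ≤ 2 ^ 25 * sumS s := by
  rw [valS, sumS, Finset.mul_sum]
  refine Finset.sum_le_sum (fun i hi => ?_)
  rw [Finset.mem_range] at hi
  calc s.count (letterC i) * 2 ^ i ≤ s.count (letterC i) * 2 ^ 25 :=
        Nat.mul_le_mul_left _ (Nat.pow_le_pow_right (by omega) (by omega))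
    _ = 2 ^ 25 * s.count (letterC i) := Nat.mul_comm _ _

-- ---- bit extraction from a terminal state ----
theorem two_pow_sum (j : Nat) : ∑ i ∈ Finset.range j, 2 ^ i = 2 ^ j - 1 := by
  induction j with
  | zero => simp
  | succ m ih =>
    rw [Finset.sum_range_succ, ih]
    have : 1 ≤ 2 ^ m := Nat.one_le_two_pow
    have : 2 ^ (m + 1) = 2 * 2 ^ m := by ring
    omega

theorem valS_le_M (t : List Char) (h1 : ∀ i : Fin 26, t.count (letterC i) ≤ 1) :
    valS t ≤ 67108863 := by
  have : valS t ≤ ∑ i ∈ Finset.range 26, 2 ^ i := by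
    refine Finset.sum_le_sum (fun i hi => ?_)
    rw [Finset.mem_range] at hi
    have := h1 ⟨i, hi⟩
    calc t.count (letterC i) * 2 ^ i ≤ 1 * 2 ^ i := Nat.mul_le_mul_right _ (by simpa using this)
      _ = 2 ^ i := Nat.one_mul _
  rw [two_pow_sum] at this
  omega

theorem bit_extract (t : List Char) (h1 : ∀ i : Fin 26, t.count (letterC i) ≤ 1)
    (j : Nat) (hj : j < 26) :
    valS t / 2 ^ j % 2 = t.count (letterC j) := by
  have hsplit : valS t = (∑ i ∈ Finset.range j, t.count (letterC i) * 2 ^ i)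
      + t.count (letterC j) * 2 ^ j
      + ∑ i ∈ Finset.Ico (j + 1) 26, t.count (letterC i) * 2 ^ i := by
    rw [valS, Finset.range_eq_Ico,
        ← Finset.sum_Ico_consecutive _ (Nat.zero_le (j + 1)) (by omega : j + 1 ≤ 26),
        ← Finset.range_eq_Ico, Finset.sum_range_succ]
  obtain ⟨H, hH⟩ : 2 ^ (j + 1) ∣ ∑ i ∈ Finset.Ico (j + 1) 26, t.count (letterC i) * 2 ^ i := by
    refine Finset.dvd_sum (fun i hi => ?_)
    rw [Finset.mem_Ico] at hi
    exact Dvd.dvd.mul_left (pow_dvd_pow 2 hi.1) _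
  set low := ∑ i ∈ Finset.range j, t.count (letterC i) * 2 ^ i with hlow
  have hlowlt : low < 2 ^ j := by
    have : low ≤ ∑ i ∈ Finset.range j, 2 ^ i := by
      refine Finset.sum_le_sum (fun i hi => ?_)
      rw [Finset.mem_range] at hi
      have := h1 ⟨i, by omega⟩
      calc t.count (letterC i) * 2 ^ i ≤ 1 * 2 ^ i := Nat.mul_le_mul_right _ (by simpa using this)
        _ = 2 ^ i := Nat.one_mul _
    rw [two_pow_sum] at this
    have : 1 ≤ 2 ^ j := Nat.one_le_two_pow
    omega
  have hval : valS t = low + 2 ^ j * (t.count (letterC j) + 2 * H) := by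
    rw [hsplit, hH]
    ring
  have hdiv : (low + 2 ^ j * (t.count (letterC j) + 2 * H)) / 2 ^ j
      = t.count (letterC j) + 2 * H := by
    rw [Nat.mul_comm, Nat.add_mul_div_right _ _ (Nat.two_pow_pos j),
        Nat.div_eq_of_lt hlowlt, Nat.zero_add]
  rw [hval, hdiv]
  have hcj : t.count (letterC j) ≤ 1 := h1 ⟨j, hj⟩
  omega

-- ---- B's tally pass ----
theorem valS_append_low (p : List Char) (ch : Char) (hl : lowB ch = true) :
    valS (p ++ [ch]) = valS p + 2 ^ (ch.toNat - 97) := by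
  obtain ⟨hlt, he⟩ := low_char_eq ch hl
  have hterm : ∀ j ∈ Finset.range 26,
      (p ++ [ch]).count (letterC j) * 2 ^ j
        = p.count (letterC j) * 2 ^ j + (if j = ch.toNat - 97 then 2 ^ j else 0) := by
    intro j hj
    rw [Finset.mem_range] at hj
    have hcnt : ([ch].count (letterC j)) = (if j = ch.toNat - 97 then 1 else 0) := by
      by_cases e : j = ch.toNat - 97
      · subst e; rw [if_pos rfl, ← he]; simp
      · rw [if_neg e, List.count_eq_zero]
        intro hm
        rw [List.mem_singleton] at hm
        exact e ((letterC_inj' hj hlt).mp (hm.trans he))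
    rw [List.count_append, hcnt, Nat.add_mul]
    by_cases e : j = ch.toNat - 97 <;> simp [e]
  rw [valS, valS, Finset.sum_congr rfl hterm, Finset.sum_add_distrib,
      Finset.sum_ite_eq' (Finset.range 26) (ch.toNat - 97) (fun j => 2 ^ j),
      if_pos (Finset.mem_range.mpr hlt)]

theorem valS_append_other (p : List Char) (ch : Char) (hl : lowB ch = false) :
    valS (p ++ [ch]) = valS p := by
  rw [valS, valS]
  refine Finset.sum_congr rfl (fun j hj => ?_)
  rw [Finset.mem_range] at hj
  rw [List.count_append, List.count_singleton, if_neg, Nat.add_zero]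
  rw [beq_iff_eq]
  intro hc
  have hx := lowB_letterC ⟨j, hj⟩
  simp only [] at hx
  rw [← hc] at hx
  exact absurd hx (by simp [hl])

theorem othersOf_append (p : List Char) (ch : Char) :
    othersOf (p ++ [ch]) = if lowB ch then othersOf p else othersOf p ++ [ch] := by
  rw [othersOf, List.filter_append]
  by_cases hl : lowB ch = true <;> simp [othersOf, List.filter, hl]

theorem tallyB_go (s : List Char) : ∀ p : List Char,
    s.foldl
      (fun (st : Int × List Char) ch =>
        if 'a' ≤ ch ∧ ch ≤ 'z' then
          (st.1 + ((2 ^ (ch.toNat - 97) : Nat) : Int), st.2)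
        else (st.1, st.2 ++ [ch]))
      ((valS p : Int), othersOf p) = ((valS (p ++ s) : Int), othersOf (p ++ s)) := by
  induction s with
  | nil => intro p; rw [List.foldl_nil, List.append_nil]
  | cons ch t ih =>
    intro p
    rw [List.foldl_cons]
    have hstep : (if 'a' ≤ ch ∧ ch ≤ 'z' then
          ((valS p : Int) + ((2 ^ (ch.toNat - 97) : Nat) : Int), othersOf p)
        else ((valS p : Int), othersOf p ++ [ch]))
        = ((valS (p ++ [ch]) : Int), othersOf (p ++ [ch])) := by
      by_cases hl : lowB ch = true
      · rw [if_pos (by simpa [lowB] using hl), valS_append_low p ch hl,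
            othersOf_append, if_pos hl, Nat.cast_add]
      · have hl' : lowB ch = false := by simpa using hl
        rw [if_neg (by simpa [lowB] using hl), valS_append_other p ch hl',
            othersOf_append, if_neg (by simp [hl'])]
    rw [hstep, ih (p ++ [ch]), List.append_assoc, List.singleton_append]

theorem tallyB_eq (s : List Char) :
    s.foldl
      (fun (st : Int × List Char) ch =>
        if 'a' ≤ ch ∧ ch ≤ 'z' then
          (st.1 + ((2 ^ (ch.toNat - 97) : Nat) : Int), st.2)
        else (st.1, st.2 ++ [ch]))
      ((0 : Int), []) = ((valS s : Int), othersOf s) := by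
  have h0 : ((0 : Int), ([] : List Char)) = ((valS [] : Int), othersOf []) := by
    have : valS [] = 0 := by simp [valS]
    rw [this, othersOf]
    rfl
  rw [h0, tallyB_go s [], List.nil_append]

-- ---- B's bit readout equals the terminal survivors ----
theorem survivorsB_eq (t : List Char) (h1 : ∀ i : Fin 26, t.count (letterC i) ≤ 1) :
    ((PySem.List.pyRange 0 26).filter
        (fun i => PySem.Int.mod (PySem.Int.floordiv ((valS t : Nat) : Int) ((2:Int) ^ i.toNat)) 2 == 1)).map
        (fun i => Char.ofNat (97 + i).toNat)
      = ((List.range 26).filter (fun k => t.count (letterC k) ≠ 0)).map letterC := by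
  rw [show (26:Int) = ((26:Nat):Int) from rfl, PySem.List.pyRange_zero_natCast,
      List.filter_map, List.map_map]
  have hfun : ((fun i : Int => Char.ofNat (97 + i).toNat) ∘ (fun k : Nat => (k : Int))) = letterC := by
    funext k
    simp only [Function.comp_apply]
    have h1 : ((97:Int) + (k : Nat)).toNat = 97 + k := by omega
    rw [h1]; rfl
  rw [hfun]
  refine congrArg (List.map letterC) (List.filter_congr fun k hk => ?_)
  rw [List.mem_range] at hk
  have hcast : ((2:Int) ^ ((k : Int)).toNat) = ((2 ^ k : Nat) : Int) := by
    push_cast; rfl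
  rw [Function.comp_apply, hcast, PySem.Int.floordiv_natCast,
      show (2:Int) = ((2:Nat):Int) from rfl, PySem.Int.mod_natCast, bit_extract t h1 k hk]
  have hcj : t.count (letterC k) ≤ 1 := h1 ⟨k, hk⟩
  by_cases h0 : t.count (letterC k) = 0
  · simp [h0]
  · have hone : t.count (letterC k) = 1 := by omega
    simp [hone]

-- ---- the terminal multiset ----
theorem final_perm (t : List Char) (h1 : ∀ i : Fin 26, t.count (letterC i) ≤ 1) :
    t.Perm (othersOf t ++
      ((List.range 26).filter (fun k => t.count (letterC k) ≠ 0)).map letterC) := by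
  set fl := (List.range 26).filter (fun k => t.count (letterC k) ≠ 0) with hfl
  have hflmem : ∀ k ∈ fl, k < 26 ∧ t.count (letterC k) ≠ 0 := by
    intro k hk
    rw [hfl, List.mem_filter, List.mem_range] at hk
    exact ⟨hk.1, by simpa using hk.2⟩
  have hnodup : (fl.map letterC).Nodup := by
    refine List.Nodup.map_on ?_ ((List.nodup_range).filter _)
    intro a ha b hb hab
    exact (letterC_inj' (hflmem a ha).1 (hflmem b hb).1).mp hab
  rw [List.perm_iff_count]
  intro a
  rw [List.count_append]
  by_cases hl : lowB a = true
  · obtain ⟨hlt, he⟩ := low_char_eq a hl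
    have h0 : (othersOf t).count a = 0 := by
      rw [List.count_eq_zero]
      intro hmem
      rw [othersOf, List.mem_filter] at hmem
      simp [hl] at hmem
    rw [h0, Nat.zero_add]
    have hcnt : t.count a ≤ 1 := by
      have := h1 ⟨a.toNat - 97, hlt⟩
      simpa [← he] using this
    by_cases hz : t.count a = 0
    · rw [hz, eq_comm, List.count_eq_zero]
      intro hmem
      rw [List.mem_map] at hmem
      obtain ⟨k, hk, hka⟩ := hmem
      have hk26 := (hflmem k hk).1
      have : k = a.toNat - 97 := (letterC_inj' hk26 hlt).mp (hka.trans he)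
      subst this
      exact (hflmem _ hk).2 (by rw [← he]; exact hz)
    · have hone : t.count a = 1 := by omega
      rw [hone]
      have hmem : a ∈ fl.map letterC := by
        rw [List.mem_map]
        refine ⟨a.toNat - 97, ?_, he.symm⟩
        rw [hfl, List.mem_filter, List.mem_range]
        exact ⟨hlt, by simpa using (fun hh => hz (by rw [he]; exact hh))⟩
      exact (List.count_eq_one_of_mem hnodup hmem).symm
  · have h0 : (othersOf t).count a = t.count a := by
      rw [othersOf]
      exact List.count_filter (by simp [hl])
    have hz : (fl.map letterC).count a = 0 := by
      rw [List.count_eq_zero]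
      intro hmem
      rw [List.mem_map] at hmem
      obtain ⟨k, hk, hka⟩ := hmem
      have hk26 := (hflmem k hk).1
      have := lowB_letterC ⟨k, hk26⟩
      simp only [] at this
      rw [hka] at this
      exact hl this
    rw [h0, hz, Nat.add_zero]

-- ---- the closed form: terminal value = ((N-1) mod M) + 1 ----
theorem terminal_value (s t : List Char) (hk : ∃ k, valS s = valS t + k * 67108863)
    (hle : valS t ≤ 67108863) (hpos : 1 ≤ sumS s → 1 ≤ sumS t) :
    (valS t : Int) = if (valS s : Int) ≠ 0 then PySem.Int.mod ((valS s : Int) - 1) 67108863 + 1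
      else (valS s : Int) := by
  obtain ⟨k, hkk⟩ := hk
  by_cases h0 : valS s = 0
  · rw [if_neg (by exact_mod_cast fun h => (h : ¬ _) (by exact_mod_cast h0))]
    · omega
  · rw [if_pos (by exact_mod_cast h0)]
    have hs1 : 1 ≤ sumS s := by
      have := sumS_le_valS s
      have := valS_le_sumS_mul s
      omega
    have ht1 : 1 ≤ valS t := le_trans (hpos hs1) (sumS_le_valS t)
    have hcast : ((valS s : Int) - 1) = (((valS s - 1 : Nat)) : Int) := by omega
    rw [hcast, show (67108863 : Int) = ((67108863 : Nat) : Int) from rfl, PySem.Int.mod_natCast]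
    have hmod : (valS s - 1) % 67108863 = valS t - 1 := by
      have he : valS s - 1 = (valS t - 1) + k * 67108863 := by omega
      rw [he, Nat.add_mul_mod_self_right, Nat.mod_eq_of_lt (by omega)]
    rw [hmod]
    omega

-- ===== VERDICT (by name: the statement is the Claim_ definition above) =====
theorem last_survivors_spec : Claim_equal_last_survivors := by
  intro string _hdom hpre
  show last_survivors string = last_survivors_alt string
  have hO : (othersOf string.toList).Nodup := by
    have hpred : (fun ch : Char => decide ¬('a' ≤ ch ∧ ch ≤ 'z')) = (fun ch => !lowB ch) := by
      funext ch
      by_cases h1 : 'a' ≤ ch <;> by_cases h2 : ch ≤ 'z' <;> simp [lowB, h1, h2]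
    rw [othersOf, ← hpred]
    exact hpre
  have hsum := sumS_le_length string.toList
  obtain ⟨r1, r2, r3, r4⟩ := loop_props (string.toList.length + 1) string.toList hO (by omega)
  set t := loopA (string.toList.length + 1) string.toList with ht
  have hperm := final_perm t r3
  rw [r1] at hperm
  simp only [last_survivors, last_survivors_alt]
  rw [tallyB_eq string.toList]
  simp only []
  rw [← terminal_value string.toList t r2 (valS_le_M t r3) r4, survivorsB_eq t r3]
  exact congrArg String.ofList
    (PySem.List.sorted_eq_sorted_of_perm _ _ (fun x => x) (fun a b h => h) hperm)
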